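-- pv_equiv track=rewrite | github.com/MortezaDamghaniNouri/Puzzle-Solver | Old Main.py | column_strings_finder
-- ===== SOURCE A (Python) =====
-- def column_strings_finder(input_matrix, number_of_rows):
--     strings = []
--     i = 0
--     while i < number_of_rows:
--         all_assigned = True
--         j = 0
--         temp = ""
--         while j < number_of_rows:
--             if input_matrix[j][i] == "-":
--                 all_assigned = False
--                 break
--             else:
--                 temp += input_matrix[j][i]
--             j += 1
--         if all_assigned:
--             strings.append(temp)
--         i += 1
--     return strings
-- ===== SOURCE B (Python) =====
-- def column_strings_finder(input_matrix, number_of_rows):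
--     n = number_of_rows
--     state = [("", True)] * n
--     for j in range(n):
--         row = input_matrix[j]
--         state = [(s, False) if not alive or row[i] == "-" else (s + row[i], True)
--                  for i, (s, alive) in enumerate(state)]
--     return [s for s, alive in state if alive]
-- ===== Notes on version B (the rewrite author's own statement) =====
-- stated objective: alternative
-- what changed: Transposes the traversal: instead of building each column top-down with a flag and early break, B makes a single row-major pass that threads a per-column (prefix, alive) state list across the rows, killing a column when its cell is '-', and finally keeps the surviving prefixes.
-- outside the precondition, e.g. on column_strings_finder([['-', '-']], 2): A returns [], B raises IndexError
import Mathlib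
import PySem

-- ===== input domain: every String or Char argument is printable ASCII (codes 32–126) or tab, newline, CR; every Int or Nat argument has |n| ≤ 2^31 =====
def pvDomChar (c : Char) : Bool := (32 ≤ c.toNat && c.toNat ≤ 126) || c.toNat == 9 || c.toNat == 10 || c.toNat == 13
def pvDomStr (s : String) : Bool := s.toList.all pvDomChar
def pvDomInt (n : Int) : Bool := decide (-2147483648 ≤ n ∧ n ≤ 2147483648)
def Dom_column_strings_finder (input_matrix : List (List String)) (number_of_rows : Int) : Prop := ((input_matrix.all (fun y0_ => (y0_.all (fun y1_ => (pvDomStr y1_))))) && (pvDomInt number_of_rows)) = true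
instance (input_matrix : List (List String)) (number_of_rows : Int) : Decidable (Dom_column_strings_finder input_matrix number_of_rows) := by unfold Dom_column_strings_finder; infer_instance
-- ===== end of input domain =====

-- B replaces A's column-by-column build with flag and early break by a single row-major pass
-- threading a per-column (prefix, alive) state; equal on square regions (Pre_); return value only.


-- ===== PORT A =====
-- input_matrix[j][i]; none = IndexError (unreachable under Pre_)
def pvCellA (input_matrix : List (List String)) (j i : Int) : Option String :=
  (PySem.List.pyGet? input_matrix j).bind (fun row => PySem.List.pyGet? row i)

-- inner while loop: j counts up, fuel = remaining iterations; returns none when the loop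
-- broke on a "-" cell (all_assigned = False), some temp otherwise.
-- On an IndexError cell (outside Pre_) the port returns the current temp.
def pvInnerA (input_matrix : List (List String)) (i : Int) : Nat → Int → String → Option String
  | 0, _, temp => some temp
  | k + 1, j, temp =>
    match pvCellA input_matrix j i with
    | none => some temp
    | some c => if c = "-" then none else pvInnerA input_matrix i k (j + 1) (temp ++ c)

-- outer while loop over column index i
def pvOuterA (input_matrix : List (List String)) (number_of_rows : Int) :
    Nat → Int → List String → List String
  | 0, _, strings => strings
  | k + 1, i, strings =>
    match pvInnerA input_matrix i number_of_rows.toNat 0 "" with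
    | some temp => pvOuterA input_matrix number_of_rows k (i + 1) (strings ++ [temp])
    | none => pvOuterA input_matrix number_of_rows k (i + 1) strings

def column_strings_finder (input_matrix : List (List String)) (number_of_rows : Int) : List String :=
  pvOuterA input_matrix number_of_rows number_of_rows.toNat 0 []

-- ===== PORT B =====
-- the comprehension element: '(s, False) if not alive or cell == "-" else (s + cell, True)'
def pvColStep (st : String × Bool) (cell : String) : String × Bool :=
  if !st.2 || cell == "-" then (st.1, false) else (st.1 ++ cell, true)

def column_strings_finder_alt (input_matrix : List (List String)) (number_of_rows : Int) : List String :=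
  let state :=
    (PySem.List.pyRange 0 number_of_rows 1).foldl
      (fun state j =>
        let row := PySem.List.pyGetD input_matrix j []
        (PySem.List.enumerate state).map
          (fun p => pvColStep p.2 (PySem.List.pyGetD row p.1 "")))
      (List.replicate number_of_rows.toNat ("", true))
  (state.filter (fun p => p.2)).map (fun p => p.1)

-- ===== PRECONDITION & SPEC =====
-- Pre_ excludes non-square inputs: number_of_rows must not exceed the number of rows, and each of
-- the first number_of_rows rows must have at least number_of_rows cells.  A reads cells lazily
-- (it breaks at the first "-" of a column), so on some ragged matrices A still returns a value
-- while B's row-major pass raises IndexError; exactly those inputs are excluded.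
def Pre_column_strings_finder (input_matrix : List (List String)) (number_of_rows : Int) : Prop :=
  number_of_rows ≤ input_matrix.length ∧
    ∀ row ∈ input_matrix.take number_of_rows.toNat, number_of_rows ≤ (row.length : Int)
instance (input_matrix : List (List String)) (number_of_rows : Int) : Decidable (Pre_column_strings_finder input_matrix number_of_rows) := by unfold Pre_column_strings_finder; infer_instance
def pvWitness_column_strings_finder : List (List String) × Int := ([["a", "-"], ["b", "c"]], 2)

def Spec_column_strings_finder (input_matrix : List (List String)) (number_of_rows : Int) (out : List String) : Prop := out = column_strings_finder_alt input_matrix number_of_rows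
instance (input_matrix : List (List String)) (number_of_rows : Int) (out : List String) : Decidable (Spec_column_strings_finder input_matrix number_of_rows out) := by unfold Spec_column_strings_finder; infer_instance

-- ===== CLAIM (what is proved, stated in full; the proofs are below) =====
def Claim_equal_column_strings_finder : Prop := ∀ (input_matrix : List (List String)) (number_of_rows : Int), Dom_column_strings_finder input_matrix number_of_rows → Pre_column_strings_finder input_matrix number_of_rows → Spec_column_strings_finder input_matrix number_of_rows (column_strings_finder input_matrix number_of_rows)

-- ===== LEMMAS AND PROOFS =====

-- row[i] / input_matrix[j] with a default (Source B raises there; outside Pre_)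
def pvCellB (input_matrix : List (List String)) (j i : Int) : String :=
  PySem.List.pyGetD (PySem.List.pyGetD input_matrix j []) i ""

-- the materialized columns both sides are compared against
def pvColCells (m : List (List String)) (n : Int) (i : Int) : List String :=
  (PySem.List.pyRange 0 n 1).map (fun j => pvCellB m j i)

-- under Pre_, every cell of the square region is valid and A's read equals B's read
lemma cell_valid (m : List (List String)) (n : Int)
    (hpre : Pre_column_strings_finder m n) (i j : Int)
    (hi0 : 0 ≤ i) (hin : i < n) (hj0 : 0 ≤ j) (hjn : j < n) :
    pvCellA m j i = some (pvCellB m j i) := by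
  obtain ⟨hrows, hcols⟩ := hpre
  have hjlen : j.toNat < m.length := by omega
  have hget : PySem.List.pyGet? m j = some m[j.toNat] := by
    rw [PySem.List.pyGet?_of_nonneg m hj0]
    simp [List.getElem?_eq_getElem hjlen]
  have hrow : m[j.toNat] ∈ m.take n.toNat := by
    apply List.mem_take_iff_getElem.mpr
    exact ⟨j.toNat, by omega, rfl⟩
  have hrlen : n ≤ (m[j.toNat].length : Int) := hcols _ hrow
  have hilen : i.toNat < m[j.toNat].length := by omega
  have hgeti : PySem.List.pyGet? m[j.toNat] i = some m[j.toNat][i.toNat] := by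
    rw [PySem.List.pyGet?_of_nonneg m[j.toNat] hi0]
    simp [List.getElem?_eq_getElem hilen]
  have hB : pvCellB m j i = m[j.toNat][i.toNat] := by
    unfold pvCellB
    rw [PySem.List.pyGetD_eq_getElem m [] hj0 (by omega),
        PySem.List.pyGetD_eq_getElem m[j.toNat] "" hi0 (by omega)]
  rw [hB]
  unfold pvCellA
  rw [hget, Option.bind_some, hgeti]

-- A's inner loop computes "break on '-'" over the materialized cell list
lemma innerA_spec (m : List (List String)) (i : Int) :
    ∀ (k : Nat) (j : Int) (temp : String),
    (∀ t : Nat, t < k → pvCellA m (j + t) i = some (pvCellB m (j + t) i)) →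
    pvInnerA m i k j temp =
      (if ((List.range k).map (fun t : Nat => pvCellB m (j + (t : Int)) i)).contains "-" then none
       else some (((List.range k).map (fun t : Nat => pvCellB m (j + (t : Int)) i)).foldl (· ++ ·) temp)) := by
  intro k
  induction k with
  | zero => intro j temp _; simp [pvInnerA]
  | succ k ih =>
    intro j temp hcells
    have h0 : pvCellA m j i = some (pvCellB m j i) := by
      have := hcells 0 (by omega)
      simpa using this
    have hmap : (List.range (k + 1)).map (fun t : Nat => pvCellB m (j + (t : Int)) i)
        = pvCellB m j i :: (List.range k).map (fun t : Nat => pvCellB m ((j + 1) + (t : Int)) i) := by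
      rw [List.range_succ_eq_map]
      simp only [List.map_cons, List.map_map]
      congr 1
      · simp
      · apply List.map_congr_left
        intro t _
        simp only [Function.comp_apply]
        congr 1
        push_cast
        ring
    rw [hmap]
    unfold pvInnerA
    rw [h0]
    by_cases hdash : pvCellB m j i = "-"
    · simp [hdash]
    · have hrec := ih (j + 1) (temp ++ pvCellB m j i) (by
        intro t ht
        have := hcells (t + 1) (by omega)
        have heq : j + ((t + 1 : Nat) : Int) = (j + 1) + (t : Int) := by push_cast; ring
        rwa [heq] at this)
      simp only [hdash, if_false, hrec, List.contains_cons]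
      have hne : ("-" == pvCellB m j i) = false :=
        beq_eq_false_iff_ne.mpr (fun h => hdash h.symm)
      simp [hne, List.foldl_cons]

-- A's outer loop equals filter-then-fold over the materialized remaining columns
lemma outerA_spec (m : List (List String)) (n : Int)
    (hpre : Pre_column_strings_finder m n) :
    ∀ (k : Nat) (i : Int) (acc : List String), 0 ≤ i → i + k = n →
    pvOuterA m n k i acc =
      acc ++ (((PySem.List.pyRange i n 1).map (fun i' => pvColCells m n i')).filter
               (fun column => !column.contains "-")).map
             (fun column => column.foldl (· ++ ·) "") := by
  intro k
  induction k with
  | zero =>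
    intro i acc hi0 hik
    rw [PySem.List.pyRange_one_eq_nil (show n ≤ i by omega)]
    simp [pvOuterA]
  | succ k ih =>
    intro i acc hi0 hik
    have hin : i < n := by omega
    have hcol : pvInnerA m i n.toNat 0 "" =
        (if ((List.range n.toNat).map (fun t : Nat => pvCellB m ((0 : Int) + (t : Int)) i)).contains "-" then none
         else some (((List.range n.toNat).map (fun t : Nat => pvCellB m ((0 : Int) + (t : Int)) i)).foldl (· ++ ·) "")) := by
      apply innerA_spec
      intro t ht
      exact cell_valid m n hpre i ((0 : Int) + t) hi0 hin (by omega) (by omega)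
    have hlist : (List.range n.toNat).map (fun t : Nat => pvCellB m ((0 : Int) + (t : Int)) i)
        = pvColCells m n i := by
      unfold pvColCells
      rw [PySem.List.pyRange_one, List.map_map]
      simp only [Int.sub_zero, Function.comp_def]
    rw [hlist] at hcol
    rw [PySem.List.pyRange_one_cons hin]
    simp only [List.map_cons]
    set col := pvColCells m n i with hcoldef
    unfold pvOuterA
    rw [hcol]
    by_cases hdash : col.contains "-"
    · rw [if_pos hdash]
      show pvOuterA m n k (i + 1) acc = _
      rw [ih (i + 1) acc (by omega) (by omega), List.filter_cons]
      have hmem : ("-" : String) ∈ col := by simpa using hdash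
      simp [hmem]
    · rw [if_neg hdash]
      show pvOuterA m n k (i + 1) (acc ++ [col.foldl (· ++ ·) ""]) = _
      rw [ih (i + 1) (acc ++ [col.foldl (· ++ ·) ""]) (by omega) (by omega), List.filter_cons]
      have hmem : ("-" : String) ∉ col := by simpa using hdash
      simp [hmem]

-- enumerate over a mapped range pairs each index with its value
lemma enumerate_map_range {α : Type} :
    ∀ (k : Nat) (g : Nat → α) (s : Int),
    PySem.List.enumerate ((List.range k).map g) s
      = (List.range k).map (fun i : Nat => (s + (i : Int), g i)) := by
  intro k
  induction k with
  | zero => intro g s; simp [PySem.List.enumerate_nil]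
  | succ k ih =>
    intro g s
    rw [List.range_succ_eq_map]
    simp only [List.map_cons, PySem.List.enumerate_cons, List.map_map]
    rw [ih (g ∘ Nat.succ) (s + 1)]
    congr 1
    · norm_num
    · apply List.map_congr_left
      intro t _
      simp only [Function.comp_apply, Nat.succ_eq_add_one]
      congr 1
      push_cast
      ring

-- B's row fold acts independently on each column's state
lemma rowfold_spec (m : List (List String)) :
    ∀ (js : List Int) (k : Nat) (g : Nat → String × Bool),
    js.foldl
      (fun state j =>
        (PySem.List.enumerate state).map
          (fun p => pvColStep p.2 (PySem.List.pyGetD (PySem.List.pyGetD m j []) p.1 "")))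
      ((List.range k).map g)
    = (List.range k).map
        (fun i : Nat => js.foldl (fun st j => pvColStep st (pvCellB m j (i : Int))) (g i)) := by
  intro js
  induction js with
  | nil => intro k g; simp
  | cons j rest ih =>
    intro k g
    simp only [List.foldl_cons]
    have hstep :
        (PySem.List.enumerate ((List.range k).map g)).map
          (fun p => pvColStep p.2 (PySem.List.pyGetD (PySem.List.pyGetD m j []) p.1 ""))
        = (List.range k).map (fun i : Nat => pvColStep (g i) (pvCellB m j (i : Int))) := by
      rw [show PySem.List.enumerate ((List.range k).map g)
            = PySem.List.enumerate ((List.range k).map g) 0 from rfl,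
          enumerate_map_range k g 0, List.map_map]
      apply List.map_congr_left
      intro t _
      simp [pvCellB]
    rw [hstep, ih k (fun i : Nat => pvColStep (g i) (pvCellB m j (i : Int)))]

-- a dead column's state is absorbing
lemma colfold_dead (cells : List String) : ∀ (s : String),
    cells.foldl pvColStep (s, false) = (s, false) := by
  induction cells with
  | nil => intro s; simp
  | cons c rest ih => intro s; simp [List.foldl_cons, pvColStep, ih]

-- the per-column fold: dead iff the column contains "-", otherwise it accumulates the cells
lemma colfold_alive (cells : List String) : ∀ (s : String),
    cells.foldl pvColStep (s, true) =
      if cells.contains "-" then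
        ((cells.takeWhile (fun c => !(c == "-"))).foldl (· ++ ·) s, false)
      else (cells.foldl (· ++ ·) s, true) := by
  induction cells with
  | nil => intro s; simp
  | cons c rest ih =>
    intro s
    simp only [List.foldl_cons, List.contains_cons, List.takeWhile_cons]
    by_cases hc : c = "-"
    · subst hc
      simp [pvColStep, colfold_dead]
    · have hbe : (c == "-") = false := beq_eq_false_iff_ne.mpr hc
      have hbe' : ("-" == c) = false := beq_eq_false_iff_ne.mpr (fun h => hc h.symm)
      simp only [pvColStep, hbe, Bool.not_true, Bool.or_false, Bool.not_false]
      rw [if_neg (by simp), ih (s ++ c)]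
      by_cases hrest : ("-" : String) ∈ rest <;> simp [hrest, hbe']

-- B equals filter-then-fold over the materialized columns
lemma altB_spec (m : List (List String)) (n : Int) :
    column_strings_finder_alt m n =
      (((PySem.List.pyRange 0 n 1).map (fun i => pvColCells m n i)).filter
         (fun column => !column.contains "-")).map
       (fun column => column.foldl (· ++ ·) "") := by
  unfold column_strings_finder_alt
  simp only
  have hrepl : (List.replicate n.toNat (("", true) : String × Bool))
      = (List.range n.toNat).map (fun _ : Nat => (("", true) : String × Bool)) := by
    induction n.toNat with
    | zero => simp
    | succ k ih => rw [List.replicate_succ' , List.range_succ, List.map_append, ← ih]; simp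
  rw [hrepl,
    rowfold_spec m (PySem.List.pyRange 0 n 1) n.toNat (fun _ : Nat => (("", true) : String × Bool))]
  have hcells : ∀ i : Nat,
      (PySem.List.pyRange 0 n 1).foldl (fun st j => pvColStep st (pvCellB m j (i : Int))) ("", true)
        = (pvColCells m n (i : Int)).foldl pvColStep ("", true) := by
    intro i
    unfold pvColCells
    rw [List.foldl_map]
  have hrange : (PySem.List.pyRange 0 n 1).map (fun i => pvColCells m n i)
      = (List.range n.toNat).map (fun i : Nat => pvColCells m n (i : Int)) := by
    rw [PySem.List.pyRange_one, List.map_map]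
    simp [Function.comp_def]
  rw [hrange, List.filter_map, List.map_map, List.filter_map, List.map_map]
  have hfilter : (List.range n.toNat).filter
        ((fun p : String × Bool => p.2) ∘
          (fun i : Nat => (PySem.List.pyRange 0 n 1).foldl
            (fun st j => pvColStep st (pvCellB m j (i : Int))) ("", true)))
      = (List.range n.toNat).filter
        ((fun column : List String => !column.contains "-") ∘
          (fun i : Nat => pvColCells m n (i : Int))) := by
    apply List.filter_congr
    intro i _
    simp only [Function.comp_apply, hcells i, colfold_alive]
    by_cases hd : ("-" : String) ∈ pvColCells m n (i : Int) <;> simp [hd]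
  rw [hfilter]
  apply List.map_congr_left
  intro i hi
  have hmem := (List.mem_filter.mp hi).2
  simp only [Function.comp_apply] at hmem ⊢
  rw [hcells i, colfold_alive]
  have hd : ("-" : String) ∉ pvColCells m n (i : Int) := by
    simpa using hmem
  simp [hd]

-- ===== VERDICT (by name: the statement is the Claim_ definition above) =====
theorem column_strings_finder_spec : Claim_equal_column_strings_finder := by
  intro m n _ hpre
  unfold Spec_column_strings_finder column_strings_finder
  rw [altB_spec]
  by_cases hn : 0 < n
  · have := outerA_spec m n hpre n.toNat 0 [] le_rfl (by omega)
    simpa using this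
  · rw [PySem.List.pyRange_one_eq_nil (by omega)]
    have : n.toNat = 0 := by omega
    simp [this, pvOuterA]
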